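-- pv_equiv track=rewrite | github.com/shengtengye/shengtengye.github.io | 2048/2048_web.py | availableSpots
-- ===== SOURCE A (Python) =====
-- def availableSpots(ls):
--     lsCOPY = ls.copy()
--     spots = []
--     while 0 in lsCOPY:
--         idx = lsCOPY.index(0)
--         spots.append(idx)
--         lsCOPY[idx] = "ZERO"
--     return spots
-- ===== SOURCE B (Python) =====
-- def availableSpots(ls):
--     return [i for i, x in enumerate(ls) if x == 0]
-- ===== Notes on version B (the rewrite author's own statement) =====
-- stated objective: simpler
-- what changed: Replaces A's while-loop of repeated 'in'/'.index' scans over a mutated copy with a single enumerate comprehension collecting indices of zeros.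
import Mathlib
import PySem

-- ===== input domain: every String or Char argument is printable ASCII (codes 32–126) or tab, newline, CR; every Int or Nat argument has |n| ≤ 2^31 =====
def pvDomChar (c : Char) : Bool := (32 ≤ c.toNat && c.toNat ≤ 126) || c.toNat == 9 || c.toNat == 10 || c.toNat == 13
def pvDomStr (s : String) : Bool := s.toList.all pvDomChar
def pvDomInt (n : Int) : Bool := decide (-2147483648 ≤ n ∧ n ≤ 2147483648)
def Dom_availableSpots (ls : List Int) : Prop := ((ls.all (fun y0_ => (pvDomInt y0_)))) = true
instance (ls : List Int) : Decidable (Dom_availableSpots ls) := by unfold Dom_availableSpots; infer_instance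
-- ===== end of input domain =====

set_option maxHeartbeats 400000


-- B replaces A's repeated membership/.index scans over a mutated copy with one enumerate pass (objective: simpler).

-- ===== PORT A =====
-- A marks found zeros in a copy with the string "ZERO"; the copy's cells are therefore
-- Int-or-marker, modelled as Option Int (none = "ZERO").
-- Termination lemma for the while loop: setting the first zero cell to the marker
-- strictly decreases the number of zero cells.
theorem pvCountSetIdxOf (c : List (Option Int)) (h : (some (0:Int)) ∈ c) :
    (c.set (c.idxOf (some 0)) none).count (some 0) < c.count (some 0) := by
  induction c with
  | nil => cases h
  | cons a r ih =>
    by_cases ha : a = some (0:Int)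
    · subst ha
      simp
    · have hr : (some (0:Int)) ∈ r := by
        cases h with
        | head => exact absurd rfl ha
        | tail _ h' => exact h'
      have hb : (a == some (0:Int)) = false := by simpa using ha
      simp only [List.idxOf_cons, hb, cond_false, List.set_cons_succ, List.count_cons]
      have := ih hr
      split <;> omega

-- while 0 in lsCOPY: idx = lsCOPY.index(0); spots.append(idx); lsCOPY[idx] = "ZERO"
def aLoop (c : List (Option Int)) (spots : List Int) : List Int :=
  if h : (some (0:Int)) ∈ c then
    let idx := c.idxOf (some 0)
    aLoop (c.set idx none) (spots ++ [(idx : Int)])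
  else spots
termination_by c.count (some 0)
decreasing_by exact pvCountSetIdxOf c h

def availableSpots (ls : List Int) : List Int :=
  aLoop (ls.map some) []

-- ===== PORT B =====
-- [i for i, x in enumerate(ls) if x == 0]
def altGo (ls : List Int) (i : Int) : List Int :=
  match ls with
  | [] => []
  | x :: rest => if x = 0 then i :: altGo rest (i + 1) else altGo rest (i + 1)

def availableSpots_alt (ls : List Int) : List Int :=
  altGo ls 0

-- ===== PRECONDITION & SPEC =====
def Spec_availableSpots (ls : List Int) (out : List Int) : Prop := out = availableSpots_alt ls
instance (ls : List Int) (out : List Int) : Decidable (Spec_availableSpots ls out) := by unfold Spec_availableSpots; infer_instance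

-- ===== CLAIM (what is proved, stated in full; the proofs are below) =====
def Claim_equal_availableSpots : Prop := ∀ (ls : List Int), Dom_availableSpots ls → Spec_availableSpots ls (availableSpots ls)

-- ===== LEMMAS AND PROOFS =====

-- zero indices of an Option-Int cell list, starting at offset k
def zIdx (c : List (Option Int)) (k : Int) : List Int :=
  match c with
  | [] => []
  | a :: r => if a = some 0 then k :: zIdx r (k + 1) else zIdx r (k + 1)

theorem zIdx_step (c : List (Option Int)) (k : Int) (h : (some (0:Int)) ∈ c) :
    zIdx c k = (k + (c.idxOf (some 0) : Int)) :: zIdx (c.set (c.idxOf (some 0)) none) k := by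
  induction c generalizing k with
  | nil => cases h
  | cons a r ih =>
    by_cases ha : a = some (0:Int)
    · subst ha
      simp [zIdx]
    · have hr : (some (0:Int)) ∈ r := by
        cases h with
        | head => exact absurd rfl ha
        | tail _ h' => exact h'
      have hb : (a == some (0:Int)) = false := by simpa using ha
      simp only [zIdx, ha, if_false, List.idxOf_cons, hb, cond_false, List.set_cons_succ]
      rw [ih (k + 1) hr]
      simp only [List.cons.injEq]
      exact ⟨by push_cast; ring, trivial⟩

theorem zIdx_none (c : List (Option Int)) (k : Int) (h : (some (0:Int)) ∉ c) :
    zIdx c k = [] := by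
  induction c generalizing k with
  | nil => rfl
  | cons a r ih =>
    have ha : ¬ a = some (0:Int) := fun e => h (e ▸ List.mem_cons_self)
    have hr : (some (0:Int)) ∉ r := fun m => h (List.mem_cons_of_mem _ m)
    simp [zIdx, ha, ih _ hr]

theorem aLoop_eq (c : List (Option Int)) (spots : List Int) :
    aLoop c spots = spots ++ zIdx c 0 := by
  induction c, spots using aLoop.induct with
  | case1 c spots h idx ih =>
    rw [aLoop]
    simp only [h, dif_pos]
    rw [ih, zIdx_step c 0 h]
    simp [idx]
  | case2 c spots h =>
    rw [aLoop]
    simp only [h, dif_neg, not_false_iff]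
    rw [zIdx_none c 0 h]; simp

theorem altGo_eq (ls : List Int) (i : Int) : altGo ls i = zIdx (ls.map some) i := by
  induction ls generalizing i with
  | nil => rfl
  | cons x r ih =>
    by_cases hx : x = 0 <;> simp [altGo, zIdx, hx, ih]

-- ===== VERDICT (by name: the statement is the Claim_ definition above) =====
theorem availableSpots_spec : Claim_equal_availableSpots := by
  intro ls _
  unfold Spec_availableSpots availableSpots availableSpots_alt
  rw [aLoop_eq, altGo_eq]
  simp
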